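-- pv_equiv track=rewrite | github.com/tsaanghwang/Yime | syllable/analysis/initial_divrhyme/potential_syllable.py | normalize_pinyin
-- ===== SOURCE A (Python) =====
-- TONE_MARKS = {
--     "1": "̄",  # 高平调
--     "2": "́",  # 升调
--     "3": "̌",  # 低平调
--     "4": "̀",  # 降调
--     "5": ""   # 轻声
-- }
--
-- VOWEL_PRIORITY = ['a', 'o', 'e', 'ü', 'i', 'u']
--
-- SPECIAL_QUALITIES = ["ê", "m", "n", "ng", "hm", "hn", "hng"]
--
-- def normalize_pinyin(pinyin_with_tone: str) -> str:
--     """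
--     将带数字调号的拼音转换为带声调符号的标准拼音
--     参考 pinyin_normalizer.py 的实现
--
--     参数:
--         pinyin_with_tone: 带数字调号的拼音 (如 "zhong1")
--
--     返回:
--         带声调符号的标准拼音 (如 "zhōng")
--     """
--     if not pinyin_with_tone or not pinyin_with_tone[-1].isdigit():
--         return pinyin_with_tone  # 没有调号，直接返回
--
--     tone_num = pinyin_with_tone[-1]
--     pinyin = pinyin_with_tone[:-1].replace("v", "ü")  # 处理v->ü转换
--
--     # 检查是否是特殊音质拼音
--     for sq in SPECIAL_QUALITIES:
--         if pinyin == sq: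
--             return normalize_special_pinyin(sq, tone_num)
--
--     # 按优先级查找元音位置
--     for vowel in VOWEL_PRIORITY:
--         if vowel in pinyin:
--             index = pinyin.index(vowel)
--             return pinyin[:index] + vowel + TONE_MARKS[tone_num] + pinyin[index+1:]
--
--     # 没有找到可标调的元音，返回不带调号的拼音
--     return pinyin
--
-- def normalize_special_pinyin(syllable: str, tone: str) -> str:
--     """
--     标准化特殊音质拼音（ê, m, n, ng, hm, hn, hng）
--
--     参数:
--         syllable: 特殊音质音节（不带声调）
--         tone: 声调数字（1-5）
--
--     返回:
--         带声调符号的标准拼音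
--     """
--     if tone not in TONE_MARKS:
--         return syllable
--
--     if syllable == "ê":
--         return "ê" + TONE_MARKS[tone]
--     elif syllable in ["m", "n"]:
--         return syllable + TONE_MARKS[tone]
--     elif syllable == "ng":
--         return "n" + TONE_MARKS[tone] + "g"  # 标调在n上
--     elif syllable in ["hm", "hn", "hng"]:
--         if syllable == "hng":
--             return "h" + "n" + TONE_MARKS[tone] + "g"
--         return "h" + syllable[1] + TONE_MARKS[tone]
--     return syllable
-- ===== SOURCE B (Python) =====
-- # Single left-to-right scan with a vowel->priority rank table (instead of one
-- # membership scan per vowel), and a table of mark positions for the special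
-- # syllables (instead of a branch chain). Same return value as A wherever A returns.
-- TONE_MARKS = {
--     "1": "\u0304",
--     "2": "\u0301",
--     "3": "\u030c",
--     "4": "\u0300",
--     "5": ""
-- }
--
-- _VOWEL_RANK = {'a': 0, 'o': 1, 'e': 2, 'ü': 3, 'i': 4, 'u': 5}
--
-- # where the tone mark is inserted in each special-quality syllable
-- _SPECIAL_MARK_POS = {"ê": 1, "m": 1, "n": 1, "ng": 1, "hm": 2, "hn": 2, "hng": 2}
--
--
-- def normalize_pinyin(pinyin_with_tone: str) -> str:
--     if not pinyin_with_tone or not pinyin_with_tone[-1].isdigit():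
--         return pinyin_with_tone
--
--     tone_num = pinyin_with_tone[-1]
--     pinyin = pinyin_with_tone[:-1].replace("v", "ü")
--
--     pos = _SPECIAL_MARK_POS.get(pinyin)
--     if pos is not None:
--         mark = TONE_MARKS.get(tone_num)
--         if mark is None:
--             return pinyin
--         return pinyin[:pos] + mark + pinyin[pos:]
--
--     best = None  # (rank, index) of the best-ranked vowel seen so far
--     for i, ch in enumerate(pinyin):
--         r = _VOWEL_RANK.get(ch)
--         if r is not None and (best is None or r < best[0]):
--             best = (r, i)
--
--     if best is None:
--         return pinyin
--     i = best[1]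
--     return pinyin[:i + 1] + TONE_MARKS[tone_num] + pinyin[i + 1:]
-- ===== Notes on version B (the rewrite author's own statement) =====
-- stated objective: alternative
-- what changed: A finds the marked vowel by scanning the syllable once per priority vowel and calling index; B makes a single left-to-right pass tracking the index of the best-ranked vowel via a vowel-to-priority rank dict, and replaces the special-syllable branch chain by a mark-position table.
import Mathlib
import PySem

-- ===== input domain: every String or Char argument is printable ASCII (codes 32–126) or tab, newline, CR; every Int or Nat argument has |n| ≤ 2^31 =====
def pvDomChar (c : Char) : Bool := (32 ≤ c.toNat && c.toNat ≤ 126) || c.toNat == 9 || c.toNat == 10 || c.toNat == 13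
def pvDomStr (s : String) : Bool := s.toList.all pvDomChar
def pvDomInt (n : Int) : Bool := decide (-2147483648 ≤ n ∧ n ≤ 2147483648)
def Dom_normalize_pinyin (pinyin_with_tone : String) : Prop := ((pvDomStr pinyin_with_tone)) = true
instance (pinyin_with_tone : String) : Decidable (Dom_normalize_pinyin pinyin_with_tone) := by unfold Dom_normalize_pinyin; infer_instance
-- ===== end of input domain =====

-- B replaces A's per-vowel membership scans by one left-to-right pass with a vowel→priority
-- rank table, and A's special-syllable branch chain by a mark-position table (objective: alternative).

-- ===== PORT A =====

-- TONE_MARKS (shared module constant; values are the combining tone marks; the neutral tone maps to the empty mark)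
def toneMarks : PySem.Dict Char (List Char) :=
  PySem.Dict.ofList [('1', ['\u0304']), ('2', ['\u0301']), ('3', ['\u030C']), ('4', ['\u0300']), ('5', [])]

def vowelPriority : List Char := ['a', 'o', 'e', 'ü', 'i', 'u']

def specialQualities : List (List Char) :=
  [['ê'], ['m'], ['n'], ['n','g'], ['h','m'], ['h','n'], ['h','n','g']]

-- normalize_special_pinyin: 'if tone not in TONE_MARKS: return syllable' is the none-branch
def normalize_special_pinyin (syllable : List Char) (tone : Char) : List Char :=
  match toneMarks.get? tone with
  | none => syllable
  | some mk =>
    if syllable = ['ê'] then ['ê'] ++ mk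
    else if syllable = ['m'] ∨ syllable = ['n'] then syllable ++ mk
    else if syllable = ['n','g'] then ['n'] ++ mk ++ ['g']
    else if syllable = ['h','m'] ∨ syllable = ['h','n'] ∨ syllable = ['h','n','g'] then
      if syllable = ['h','n','g'] then ['h'] ++ ['n'] ++ mk ++ ['g']
      else ['h'] ++ [PySem.List.pyGetD syllable 1 'h'] ++ mk   -- syllable[1]; index 1 is in range on both branches
    else syllable

-- 'for vowel in VOWEL_PRIORITY: if vowel in pinyin: return …' ; 'vowel in pinyin' for a
-- 1-char vowel is exactly membership, and 'pinyin.index(vowel)' on a present char is idxOf.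
-- TONE_MARKS[tone] raises KeyError when tone ∉ TONE_MARKS: excluded by Pre_ (getD [] there).
def aVowelLoop : List Char → List Char → Char → Option (List Char)
  | [], _, _ => none
  | v :: vs, pinyin, tone =>
    if pinyin.contains v then
      some (pinyin.take (pinyin.idxOf v) ++ [v] ++ (toneMarks.get? tone).getD []
              ++ pinyin.drop (pinyin.idxOf v + 1))
    else aVowelLoop vs pinyin tone

def normalize_pinyin (pinyin_with_tone : String) : String :=
  match pinyin_with_tone.toList.getLast? with
  | none => pinyin_with_tone                   -- 'not pinyin_with_tone'
  | some tone =>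
    if PySem.Chars.isdigit tone = false then pinyin_with_tone    -- 'not …[-1].isdigit()'
    else
      -- pinyin_with_tone[:-1].replace("v", "ü")
      let pinyin := PySem.Chars.replace pinyin_with_tone.toList.dropLast ['v'] ['ü']
      -- 'for sq in SPECIAL_QUALITIES: if pinyin == sq: return normalize_special_pinyin(sq, tone)'
      match specialQualities.find? (fun sq => pinyin == sq) with
      | some sq => String.mk (normalize_special_pinyin sq tone)
      | none =>
        match aVowelLoop vowelPriority pinyin tone with
        | some r => String.mk r
        | none => String.mk pinyin

-- ===== PORT B =====

-- _VOWEL_RANK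
def vowelRank : PySem.Dict Char Int :=
  PySem.Dict.ofList [('a', 0), ('o', 1), ('e', 2), ('ü', 3), ('i', 4), ('u', 5)]

-- _SPECIAL_MARK_POS
def specialMarkPos : PySem.Dict (List Char) Nat :=
  PySem.Dict.ofList [(['ê'], 1), (['m'], 1), (['n'], 1), (['n','g'], 1),
                     (['h','m'], 2), (['h','n'], 2), (['h','n','g'], 2)]

-- 'for i, ch in enumerate(pinyin): r = _VOWEL_RANK.get(ch); if r is not None and (best is None or r < best[0]): best = (r, i)'
def bScan (pinyin : List Char) : Option (Int × Int) :=
  (PySem.List.enumerate pinyin 0).foldl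
    (fun best ic =>
      match vowelRank.get? ic.2 with
      | none => best
      | some r =>
        match best with
        | none => some (r, ic.1)
        | some b => if r < b.1 then some (r, ic.1) else best)
    none

def normalize_pinyin_alt (pinyin_with_tone : String) : String :=
  match pinyin_with_tone.toList.getLast? with
  | none => pinyin_with_tone
  | some tone =>
    if PySem.Chars.isdigit tone = false then pinyin_with_tone
    else
      let pinyin := PySem.Chars.replace pinyin_with_tone.toList.dropLast ['v'] ['ü']
      match specialMarkPos.get? pinyin with
      | some pos =>
        match toneMarks.get? tone with
        | none => String.mk pinyin
        | some mk => String.mk (pinyin.take pos ++ mk ++ pinyin.drop pos)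
      | none =>
        match bScan pinyin with
        | none => String.mk pinyin
        | some b =>
          -- pinyin[:i+1] + TONE_MARKS[tone_num] + pinyin[i+1:]; i = b.2 is a nonnegative
          -- enumerate index, so the slices are take/drop; KeyError inputs excluded by Pre_
          String.mk (pinyin.take (b.2.toNat + 1) ++ (toneMarks.get? tone).getD []
                       ++ pinyin.drop (b.2.toNat + 1))

-- ===== PRECONDITION & SPEC =====
-- Pre_ excludes exactly the inputs where A raises KeyError (TONE_MARKS[tone_num] with a final
-- digit outside '1'..'5', a non-special syllable and a markable vowel present); B raises there too.
def Pre_normalize_pinyin (pinyin_with_tone : String) : Prop :=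
  (match pinyin_with_tone.toList.getLast? with
   | none => true
   | some c =>
     !PySem.Chars.isdigit c
     || ['1','2','3','4','5'].contains c
     || decide (pinyin_with_tone.toList.dropLast ∈
          ([['m'], ['n'], ['n','g'], ['h','m'], ['h','n'], ['h','n','g']] : List (List Char)))
     || ['a','o','e','v','i','u'].all (fun v => !pinyin_with_tone.toList.dropLast.contains v)) = true
instance (pinyin_with_tone : String) : Decidable (Pre_normalize_pinyin pinyin_with_tone) := by
  unfold Pre_normalize_pinyin; infer_instance

def pvWitness_normalize_pinyin : String := "zhong1"

def Spec_normalize_pinyin (pinyin_with_tone : String) (out : String) : Prop := out = normalize_pinyin_alt pinyin_with_tone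
instance (pinyin_with_tone : String) (out : String) : Decidable (Spec_normalize_pinyin pinyin_with_tone out) := by unfold Spec_normalize_pinyin; infer_instance

-- ===== CLAIM (what is proved, stated in full; the proofs are below) =====
def Claim_equal_normalize_pinyin : Prop := ∀ (pinyin_with_tone : String), Dom_normalize_pinyin pinyin_with_tone → Pre_normalize_pinyin pinyin_with_tone → Spec_normalize_pinyin pinyin_with_tone (normalize_pinyin pinyin_with_tone)

-- ===== LEMMAS AND PROOFS =====

-- left-biased "keep the smaller rank" merge underlying B's scan step
def vmerge : Option (Int × Int) → Option (Int × Int) → Option (Int × Int)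
  | none, b => b
  | some a, none => some a
  | some a, some b => if b.1 < a.1 then some b else some a

-- pure recursive value of B's scan (index relative to the head)
def bp : List Char → Option (Int × Int)
  | [] => none
  | c :: t => vmerge ((vowelRank.get? c).map (fun r => (r, 0)))
                     ((bp t).map (fun q => (q.1, q.2 + 1)))

theorem vmerge_assoc (a b c : Option (Int × Int)) :
    vmerge (vmerge a b) c = vmerge a (vmerge b c) := by
  rcases a with _ | ⟨a1, a2⟩ <;> rcases b with _ | ⟨b1, b2⟩ <;> rcases c with _ | ⟨c1, c2⟩ <;>
    simp only [vmerge] <;> split_ifs <;> simp only [vmerge] <;> split_ifs <;>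
    first | rfl | (exfalso; omega)

theorem vmerge_map_shift (a b : Option (Int × Int)) (k : Int) :
    (vmerge a b).map (fun q => (q.1, q.2 + k))
      = vmerge (a.map (fun q => (q.1, q.2 + k))) (b.map (fun q => (q.1, q.2 + k))) := by
  rcases a with _ | a <;> rcases b with _ | b <;> simp only [vmerge, Option.map_some,
    Option.map_none] <;> split_ifs <;> simp

theorem bScan_foldl_inv (t : List Char) : ∀ (i : Int) (best : Option (Int × Int)),
    (PySem.List.enumerate t i).foldl
      (fun best ic =>
        match vowelRank.get? ic.2 with
        | none => best
        | some r =>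
          match best with
          | none => some (r, ic.1)
          | some b => if r < b.1 then some (r, ic.1) else best)
      best
    = vmerge best ((bp t).map (fun q => (q.1, q.2 + i))) := by
  induction t with
  | nil => intro i best; cases best <;> simp [PySem.List.enumerate_nil, bp, vmerge]
  | cons c t ih =>
    intro i best
    rw [PySem.List.enumerate_cons, List.foldl_cons, ih]
    have hstep : (match vowelRank.get? c with
        | none => best
        | some r =>
          match best with
          | none => some (r, i)
          | some b => if r < b.1 then some (r, i) else best)
        = vmerge best ((vowelRank.get? c).map (fun r => (r, i))) := by
      rcases vowelRank.get? c with _ | r <;> rcases best with _ | b <;> simp [vmerge]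
    rw [hstep, bp, vmerge_map_shift, vmerge_assoc]
    congr 2
    · rcases vowelRank.get? c with _ | r <;> simp
    · rcases bp t with _ | q <;> simp <;> omega

theorem bScan_eq_bp (p : List Char) : bScan p = bp p := by
  rw [bScan, bScan_foldl_inv p 0 none]
  rcases bp p with _ | q <;> simp [vmerge]

-- the vowel a rank names
def vow (r : Int) : Char := vowelPriority.getD r.toNat ' '

-- what B's scan computes: the first occurrence of the highest-priority vowel present
def Good (cs : List Char) : Option (Int × Int) → Prop
  | none => ∀ v ∈ vowelPriority, v ∉ cs
  | some (r, i) => 0 ≤ r ∧ r < 6 ∧ vow r ∈ cs ∧ i = (cs.idxOf (vow r) : Int) ∧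
      ∀ r', 0 ≤ r' → r' < r → vow r' ∉ cs

theorem rank_none_iff (c : Char) : vowelRank.get? c = none ↔ c ∉ vowelPriority := by
  have h : vowelRank = PySem.Dict.mk [('a', 0), ('o', 1), ('e', 2), ('ü', 3), ('i', 4), ('u', 5)] := by
    decide
  rw [h, vowelPriority]
  simp only [PySem.Dict.get?_mk_cons, beq_iff_eq, List.mem_cons, List.not_mem_nil]
  split_ifs <;> simp_all [eq_comm, PySem.Dict.get?]

theorem rank_some (c : Char) (r : Int) (h : vowelRank.get? c = some r) :
    0 ≤ r ∧ r < 6 ∧ c = vow r := by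
  have hv : vowelRank = PySem.Dict.mk [('a', 0), ('o', 1), ('e', 2), ('ü', 3), ('i', 4), ('u', 5)] := by
    decide
  rw [hv] at h
  simp only [PySem.Dict.get?_mk_cons, beq_iff_eq] at h
  split_ifs at h with h1 h2 h3 h4 h5 h6
  · injection h with h; refine ⟨by omega, by omega, ?_⟩; rw [← h, ← h1]; decide
  · injection h with h; refine ⟨by omega, by omega, ?_⟩; rw [← h, ← h2]; decide
  · injection h with h; refine ⟨by omega, by omega, ?_⟩; rw [← h, ← h3]; decide
  · injection h with h; refine ⟨by omega, by omega, ?_⟩; rw [← h, ← h4]; decide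
  · injection h with h; refine ⟨by omega, by omega, ?_⟩; rw [← h, ← h5]; decide
  · injection h with h; refine ⟨by omega, by omega, ?_⟩; rw [← h, ← h6]; decide
  · simp [PySem.Dict.get?] at h

theorem vow_mem (r : Int) (h0 : 0 ≤ r) (h6 : r < 6) : vow r ∈ vowelPriority := by
  interval_cases r <;> decide

theorem vow_inj (r r' : Int) (h0 : 0 ≤ r) (h6 : r < 6) (h0' : 0 ≤ r') (h6' : r' < 6)
    (hne : r ≠ r') : vow r ≠ vow r' := by
  interval_cases r <;> interval_cases r' <;> simp_all <;> decide

theorem good_bp (cs : List Char) : Good cs (bp cs) := by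
  induction cs with
  | nil => intro v _; simp
  | cons c t ih =>
    rw [bp]
    rcases hc : vowelRank.get? c with _ | rc
    · have hcnv : c ∉ vowelPriority := (rank_none_iff c).mp hc
      rcases hbt : bp t with _ | ⟨r, j⟩ <;> rw [hbt] at ih
      · intro v hv
        simp only [List.mem_cons, not_or]
        exact ⟨fun h => hcnv (h ▸ hv), ih v hv⟩
      · obtain ⟨h0, h6, hmem, hidx, hmin⟩ := ih
        show Good (c :: t) (vmerge none (some (r, j + 1)))
        have hcv : c ≠ vow r := fun h => hcnv (h ▸ vow_mem r h0 h6)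
        refine ⟨h0, h6, List.mem_cons_of_mem _ hmem, ?_, ?_⟩
        · rw [List.idxOf_cons_ne _ (by exact hcv)]
          push_cast; omega
        · intro r' hr0 hr6
          simp only [List.mem_cons, not_or]
          exact ⟨fun h => hcnv (h ▸ vow_mem r' hr0 (by omega)), hmin r' hr0 hr6⟩
    · obtain ⟨hrc0, hrc6, hceq⟩ := rank_some c rc hc
      rcases hbt : bp t with _ | ⟨r, j⟩ <;> rw [hbt] at ih
      · show Good (c :: t) (vmerge (some (rc, 0)) none)
        refine ⟨hrc0, hrc6, by simp [← hceq], ?_, ?_⟩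
        · rw [← hceq, List.idxOf_cons_self]; simp
        · intro r' hr0 hr6
          simp only [List.mem_cons, not_or]
          refine ⟨fun h => vow_inj r' rc hr0 (by omega) hrc0 hrc6 (by omega) (by rw [h, hceq]), ?_⟩
          exact ih _ (vow_mem r' hr0 (by omega))
      · obtain ⟨h0, h6, hmem, hidx, hmin⟩ := ih
        show Good (c :: t) (vmerge (some (rc, 0)) (some (r, j + 1)))
        simp only [vmerge]
        split_ifs with hlt
        · have hcv : c ≠ vow r := fun h =>
            vow_inj rc r hrc0 hrc6 h0 h6 (by omega) (by rw [← hceq, h])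
          refine ⟨h0, h6, List.mem_cons_of_mem _ hmem, ?_, ?_⟩
          · rw [List.idxOf_cons_ne _ (by exact hcv)]
            push_cast; omega
          · intro r' hr0 hr6
            simp only [List.mem_cons, not_or]
            refine ⟨fun h => vow_inj r' rc hr0 (by omega) hrc0 hrc6 (by omega) (by rw [h, hceq]), ?_⟩
            exact hmin r' hr0 (by omega)
        · refine ⟨hrc0, hrc6, by simp [← hceq], ?_, ?_⟩
          · rw [← hceq, List.idxOf_cons_self]; simp
          · intro r' hr0 hr6
            simp only [List.mem_cons, not_or]
            refine ⟨fun h => vow_inj r' rc hr0 (by omega) hrc0 hrc6 (by omega) (by rw [h, hceq]), ?_⟩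
            exact hmin r' hr0 (by omega)

theorem aLoop_none (p : List Char) (tone : Char) (h : ∀ v ∈ vowelPriority, v ∉ p) :
    aVowelLoop vowelPriority p tone = none := by
  rw [vowelPriority] at h
  simp only [List.mem_cons, List.not_mem_nil, or_false, forall_eq_or_imp, forall_eq] at h
  obtain ⟨h1, h2, h3, h4, h5, h6⟩ := h
  simp [vowelPriority, aVowelLoop, List.contains_eq_mem, h1, h2, h3, h4, h5, h6]

theorem aLoop_some (p : List Char) (tone : Char) (r i : Int)
    (h0 : 0 ≤ r) (h6 : r < 6) (hmem : vow r ∈ p) (hidx : i = (p.idxOf (vow r) : Int))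
    (hmin : ∀ r', 0 ≤ r' → r' < r → vow r' ∉ p) :
    aVowelLoop vowelPriority p tone
      = some (p.take i.toNat ++ [vow r] ++ (toneMarks.get? tone).getD []
                ++ p.drop (i.toNat + 1)) := by
  have hit : i.toNat = p.idxOf (vow r) := by omega
  interval_cases r
  · have hv : vow 0 = 'a' := by decide
    rw [hv] at hmem hit
    simp [vowelPriority, aVowelLoop, List.contains_eq_mem, hmem, hit, hv]
  · have hv : vow 1 = 'o' := by decide
    rw [hv] at hmem hit
    have hm0 : ('a' : Char) ∉ p := by
      have := hmin 0 (by omega) (by omega); rwa [show vow 0 = 'a' from by decide] at this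
    simp [vowelPriority, aVowelLoop, List.contains_eq_mem, hmem, hit, hv, hm0]
  · have hv : vow 2 = 'e' := by decide
    rw [hv] at hmem hit
    have hm0 : ('a' : Char) ∉ p := by
      have := hmin 0 (by omega) (by omega); rwa [show vow 0 = 'a' from by decide] at this
    have hm1 : ('o' : Char) ∉ p := by
      have := hmin 1 (by omega) (by omega); rwa [show vow 1 = 'o' from by decide] at this
    simp [vowelPriority, aVowelLoop, List.contains_eq_mem, hmem, hit, hv, hm0, hm1]
  · have hv : vow 3 = 'ü' := by decide
    rw [hv] at hmem hit
    have hm0 : ('a' : Char) ∉ p := by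
      have := hmin 0 (by omega) (by omega); rwa [show vow 0 = 'a' from by decide] at this
    have hm1 : ('o' : Char) ∉ p := by
      have := hmin 1 (by omega) (by omega); rwa [show vow 1 = 'o' from by decide] at this
    have hm2 : ('e' : Char) ∉ p := by
      have := hmin 2 (by omega) (by omega); rwa [show vow 2 = 'e' from by decide] at this
    simp [vowelPriority, aVowelLoop, List.contains_eq_mem, hmem, hit, hv, hm0, hm1, hm2]
  · have hv : vow 4 = 'i' := by decide
    rw [hv] at hmem hit
    have hm0 : ('a' : Char) ∉ p := by
      have := hmin 0 (by omega) (by omega); rwa [show vow 0 = 'a' from by decide] at this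
    have hm1 : ('o' : Char) ∉ p := by
      have := hmin 1 (by omega) (by omega); rwa [show vow 1 = 'o' from by decide] at this
    have hm2 : ('e' : Char) ∉ p := by
      have := hmin 2 (by omega) (by omega); rwa [show vow 2 = 'e' from by decide] at this
    have hm3 : ('ü' : Char) ∉ p := by
      have := hmin 3 (by omega) (by omega); rwa [show vow 3 = 'ü' from by decide] at this
    simp [vowelPriority, aVowelLoop, List.contains_eq_mem, hmem, hit, hv, hm0, hm1, hm2, hm3]
  · have hv : vow 5 = 'u' := by decide
    rw [hv] at hmem hit
    have hm0 : ('a' : Char) ∉ p := by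
      have := hmin 0 (by omega) (by omega); rwa [show vow 0 = 'a' from by decide] at this
    have hm1 : ('o' : Char) ∉ p := by
      have := hmin 1 (by omega) (by omega); rwa [show vow 1 = 'o' from by decide] at this
    have hm2 : ('e' : Char) ∉ p := by
      have := hmin 2 (by omega) (by omega); rwa [show vow 2 = 'e' from by decide] at this
    have hm3 : ('ü' : Char) ∉ p := by
      have := hmin 3 (by omega) (by omega); rwa [show vow 3 = 'ü' from by decide] at this
    have hm4 : ('i' : Char) ∉ p := by
      have := hmin 4 (by omega) (by omega); rwa [show vow 4 = 'i' from by decide] at this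
    simp [vowelPriority, aVowelLoop, List.contains_eq_mem, hmem, hit, hv, hm0, hm1, hm2, hm3, hm4]

-- the special-syllable branch: A's branch chain equals B's mark-position table
theorem special_eq (p : List Char) (tone : Char) (sq : List Char)
    (hfind : specialQualities.find? (fun x => p == x) = some sq) :
    ∃ pos, specialMarkPos.get? p = some pos ∧
      normalize_special_pinyin sq tone
        = (match toneMarks.get? tone with
           | none => p
           | some mk => p.take pos ++ mk ++ p.drop pos) := by
  have hp : p = sq ∧ sq ∈ specialQualities := by
    have h1 := List.find?_some hfind
    have h2 := List.mem_of_find?_eq_some hfind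
    exact ⟨by simpa [beq_iff_eq] using h1, h2⟩
  obtain ⟨heq, hmem⟩ := hp
  subst heq
  have hsq : p = ['ê'] ∨ p = ['m'] ∨ p = ['n'] ∨ p = ['n','g'] ∨ p = ['h','m'] ∨
      p = ['h','n'] ∨ p = ['h','n','g'] := by
    simpa [specialQualities] using hmem
  rcases hsq with rfl | rfl | rfl | rfl | rfl | rfl | rfl
  · exact ⟨1, by decide, by rcases hm : toneMarks.get? tone with _ | mk <;>
      simp [normalize_special_pinyin, hm, PySem.List.pyGetD]⟩
  · exact ⟨1, by decide, by rcases hm : toneMarks.get? tone with _ | mk <;>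
      simp [normalize_special_pinyin, hm, PySem.List.pyGetD]⟩
  · exact ⟨1, by decide, by rcases hm : toneMarks.get? tone with _ | mk <;>
      simp [normalize_special_pinyin, hm, PySem.List.pyGetD]⟩
  · exact ⟨1, by decide, by rcases hm : toneMarks.get? tone with _ | mk <;>
      simp [normalize_special_pinyin, hm, PySem.List.pyGetD]⟩
  · exact ⟨2, by decide, by rcases hm : toneMarks.get? tone with _ | mk <;>
      simp [normalize_special_pinyin, hm, PySem.List.pyGetD]⟩
  · exact ⟨2, by decide, by rcases hm : toneMarks.get? tone with _ | mk <;>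
      simp [normalize_special_pinyin, hm, PySem.List.pyGetD]⟩
  · exact ⟨2, by decide, by rcases hm : toneMarks.get? tone with _ | mk <;>
      simp [normalize_special_pinyin, hm, PySem.List.pyGetD]⟩

theorem special_none (p : List Char)
    (hfind : specialQualities.find? (fun x => p == x) = none) :
    specialMarkPos.get? p = none := by
  have h : ∀ sq ∈ specialQualities, p ≠ sq := by
    intro sq hsq heq
    have := List.find?_eq_none.mp hfind sq hsq
    simp [heq] at this
  have hmk : specialMarkPos = PySem.Dict.mk [(['ê'], 1), (['m'], 1), (['n'], 1), (['n','g'], 1),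
      (['h','m'], 2), (['h','n'], 2), (['h','n','g'], 2)] := by decide
  rw [hmk]
  simp only [PySem.Dict.get?_mk_cons, beq_iff_eq]
  rw [specialQualities] at h
  simp only [List.mem_cons, List.not_mem_nil, or_false, forall_eq_or_imp, forall_eq] at h
  obtain ⟨h1, h2, h3, h4, h5, h6, h7⟩ := h
  split_ifs with g1 g2 g3 g4 g5 g6 g7
  · exact absurd g1.symm h1
  · exact absurd g2.symm h2
  · exact absurd g3.symm h3
  · exact absurd g4.symm h4
  · exact absurd g5.symm h5
  · exact absurd g6.symm h6
  · exact absurd g7.symm h7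
  · simp [PySem.Dict.get?]

-- ===== VERDICT (by name: the statement is the Claim_ definition above) =====
theorem normalize_pinyin_spec : Claim_equal_normalize_pinyin := by
  intro s _ _
  unfold Spec_normalize_pinyin
  rw [normalize_pinyin, normalize_pinyin_alt]
  cases hL : s.toList.getLast? with
  | none => rfl
  | some tone =>
    dsimp only
    by_cases hd : PySem.Chars.isdigit tone = false
    · simp [hd]
    · rw [if_neg hd, if_neg hd]
      set p := PySem.Chars.replace s.toList.dropLast ['v'] ['ü'] with hp
      cases hf : specialQualities.find? (fun x => p == x) with
      | some sq =>
        obtain ⟨pos, hpos, hval⟩ := special_eq p tone sq hf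
        rw [hpos]
        dsimp only
        rw [hval]
        rcases hm : toneMarks.get? tone with _ | mk <;> simp
      | none =>
        rw [special_none p hf, bScan_eq_bp]
        dsimp only
        have hg := good_bp p
        cases hbp : bp p with
        | none => rw [hbp] at hg; rw [aLoop_none p tone hg]
        | some q =>
          rw [hbp] at hg
          obtain ⟨r, i⟩ := q
          obtain ⟨h0, h6, hmem, hidx, hmin⟩ := hg
          rw [aLoop_some p tone r i h0 h6 hmem hidx hmin]
          have htake : p.take (i.toNat + 1) = p.take i.toNat ++ [vow r] := by
            rw [List.take_add_one]
            have : p[i.toNat]? = some (vow r) := by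
              rw [show i.toNat = p.idxOf (vow r) from by omega]
              exact List.getElem?_idxOf hmem
            rw [this]
            rfl
          simp [htake]
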